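-- pv_equiv track=rewrite | github.com/ChenLaiHong/pythonBase | test/oj/侦探沃深.py | findMan
-- ===== SOURCE A (Python) =====
-- def findMan(nums):
--     temp = nums.copy()
--     zuida = max(nums)
--     first = 0
--     for i in range(first, len(nums)):
--         for j in range(i, len(nums)):
--             if nums[j] == zuida:
--                 first = j
--                 nums.remove(nums[j])
--                 break
--     second = max(nums)
--     weizhi = temp.index(second)
--     return weizhi+1
-- ===== SOURCE B (Python) =====
-- def findMan(nums):
--     m = max(nums)
--     second = None
--     for x in nums:
--         if x != m and (second is None or x > second):
--             second = x
--     return nums.index(second) + 1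
-- ===== Notes on version B (the rewrite author's own statement) =====
-- stated objective: faster
-- what changed: Replaces the quadratic remove-all-maxima simulation (nested scans with repeated list.remove) by one linear pass that tracks the largest value strictly below the maximum, then a single index lookup.
-- intended difference: On lists whose maximum is duplicated front-heavily (last occurrence of the max at an index below 2*(count-1)) A's removal loop stalls before deleting every maximum, so A returns the first maximum's index+1, while B returns the first index of the second-largest distinct value +1, which is the function's purpose. — e.g. on findMan([5, 5, 1]): A returns 1, B returns 3
-- outside the precondition, e.g. on findMan([0, 0]): A returns 1, B raises ValueError
import Mathlib
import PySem

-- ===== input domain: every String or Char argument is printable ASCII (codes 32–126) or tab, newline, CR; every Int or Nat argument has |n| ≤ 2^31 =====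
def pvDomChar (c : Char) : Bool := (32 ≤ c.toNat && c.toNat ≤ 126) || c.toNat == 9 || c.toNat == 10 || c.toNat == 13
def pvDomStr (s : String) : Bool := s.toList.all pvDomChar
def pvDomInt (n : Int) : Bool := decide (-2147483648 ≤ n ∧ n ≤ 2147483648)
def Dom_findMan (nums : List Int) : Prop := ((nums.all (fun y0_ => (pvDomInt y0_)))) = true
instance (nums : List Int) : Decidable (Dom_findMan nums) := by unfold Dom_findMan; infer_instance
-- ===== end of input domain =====

-- B replaces A's quadratic remove-all-maxima simulation by one linear pass for the
-- largest value below the maximum plus a single index lookup (objective: faster).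
-- A mutates its argument (list.remove); the equivalence proved here is about the return value only.

-- ===== PORT A =====
-- max(nums); the none case (ValueError on empty input) is defaulted — it lies outside Pre_findMan
def pyMaxD (xs : List Int) : Int := (PySem.List.max? xs (fun x => x)).getD 0

-- inner loop: for j in range(i, len(nums)): if nums[j] == zuida: first = j; nums.remove(nums[j]); break
-- (structural recursion on the fuel cur.length - j, which only makes the same scan total)
def findManInnerGo (zuida : Int) (cur : List Int) (first : Int) : Nat → Nat → List Int × Int
  | _, 0 => (cur, first)
  | j, rem + 1 =>
    if h : j < cur.length then
      if cur[j] = zuida then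
        ((PySem.List.remove? cur cur[j]).getD cur, (j : Int))
      else findManInnerGo zuida cur first (j + 1) rem
    else (cur, first)

def findManInner (zuida : Int) (cur : List Int) (first : Int) (j : Nat) : List Int × Int :=
  findManInnerGo zuida cur first j (cur.length - j)

def findMan (nums : List Int) : Int :=
  let temp := nums
  let zuida := pyMaxD nums
  -- for i in range(first, len(nums)) with first = 0, the range frozen at entry
  let st := (List.range nums.length).foldl
      (fun (st : List Int × Int) i => findManInner zuida st.1 st.2 i) (nums, (0 : Int))
  let second := pyMaxD st.1
  -- temp.index(second); second ∈ temp always holds when Python reaches this line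
  let weizhi : Int := ((PySem.List.index? temp second).getD 0 : Nat)
  weizhi + 1

-- ===== PORT B =====
-- loop body of B: keep the running largest value strictly below m
def findManAltStep (m : Int) (s : Option Int) (x : Int) : Option Int :=
  match s with
  | none => if x ≠ m then some x else none
  | some v => if x ≠ m ∧ v < x then some x else some v

def findMan_alt (nums : List Int) : Int :=
  let m := (PySem.List.max? nums (fun x => x)).getD 0
  let second := nums.foldl (fun s x => findManAltStep m s x) none
  match second with
  | none => 0    -- Python: nums.index(None) raises ValueError; outside Pre_findMan
  | some v => ((PySem.List.index? nums v).getD 0 : Nat) + 1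

-- ===== PRECONDITION & SPEC =====
-- Pre_ excludes lists with fewer than two distinct values: there is no second-largest
-- distinct value to return (A raises ValueError on empty and singleton input; on longer
-- constant lists B, which looks for a value below the maximum, raises ValueError).
def Pre_findMan (nums : List Int) : Prop := ∃ x ∈ nums, ∃ y ∈ nums, x ≠ y
instance (nums : List Int) : Decidable (Pre_findMan nums) := by unfold Pre_findMan; infer_instance
def pvWitness_findMan : List Int := [3, 1, 2]

-- On lists whose maximum is duplicated with its last occurrence at an index below 2*(count-1),
-- A's removal loop stalls before deleting every maximum and A returns the first maximum's
-- index + 1, while B returns the first index of the second-largest distinct value + 1,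
-- which is the function's purpose.
def D_findMan (nums : List Int) : Prop :=
  ∃ m ∈ nums, (∀ x ∈ nums, x ≤ m) ∧
    2 ≤ nums.count m ∧ m ∉ nums.drop (2 * (nums.count m - 1))
instance (nums : List Int) : Decidable (D_findMan nums) := by unfold D_findMan; infer_instance

def Spec_findMan (nums : List Int) (out : Int) : Prop := ¬ D_findMan nums → out = findMan_alt nums
instance (nums : List Int) (out : Int) : Decidable (Spec_findMan nums out) := by unfold Spec_findMan; infer_instance

def pvDiffWitness_findMan : List Int := [5, 5, 1]
def pvDiffWitnessOut_findMan : Int × Int := (1, 3)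

-- ===== CLAIM (what is proved, stated in full; the proofs are below) =====
def Claim_unchanged_findMan : Prop := ∀ (nums : List Int), Dom_findMan nums → Pre_findMan nums → Spec_findMan nums (findMan nums)
def Claim_changed_findMan : Prop := Dom_findMan (pvDiffWitness_findMan) ∧ Pre_findMan (pvDiffWitness_findMan) ∧ D_findMan (pvDiffWitness_findMan) ∧ findMan (pvDiffWitness_findMan) = pvDiffWitnessOut_findMan.1 ∧ findMan_alt (pvDiffWitness_findMan) = pvDiffWitnessOut_findMan.2 ∧ pvDiffWitnessOut_findMan.1 ≠ pvDiffWitnessOut_findMan.2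
def Claim_exact_findMan : Prop := ∀ (nums : List Int), Dom_findMan nums → Pre_findMan nums → D_findMan nums → findMan nums ≠ findMan_alt nums

-- ===== LEMMAS AND PROOFS =====

-- iterated first-occurrence erase (proof-only)
def eraseN (m : Int) : Nat → List Int → List Int
  | 0, l => l
  | i + 1, l => (eraseN m i l).erase m

-- ---- inner loop characterisation ----
lemma innerGo_of_mem (m : Int) (cur : List Int) (first : Int) :
    ∀ (rem j : Nat), m ∈ cur.drop j → cur.length ≤ j + rem →
      (findManInnerGo m cur first j rem).1 = cur.erase m := by
  intro rem
  induction rem with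
  | zero =>
    intro j hm hle
    have hj : j < cur.length := by
      by_contra h
      rw [List.drop_eq_nil_of_le (le_of_not_gt h)] at hm
      exact absurd hm (List.not_mem_nil)
    omega
  | succ rem ih =>
    intro j hm hle
    have hj : j < cur.length := by
      by_contra h
      rw [List.drop_eq_nil_of_le (le_of_not_gt h)] at hm
      exact absurd hm (List.not_mem_nil)
    rw [findManInnerGo, dif_pos hj]
    by_cases hc : cur[j] = m
    · have hmc : m ∈ cur := by rw [← hc]; exact List.getElem_mem hj
      rw [if_pos hc, hc, PySem.List.remove?_eq_some_erase cur m hmc]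
      rfl
    · rw [if_neg hc]
      have hm' : m ∈ cur.drop (j + 1) := by
        rw [List.drop_eq_getElem_cons hj] at hm
        rcases List.mem_cons.mp hm with h | h
        · exact absurd h.symm hc
        · exact h
      exact ih (j + 1) hm' (by omega)

lemma innerGo_of_not_mem (m : Int) (cur : List Int) (first : Int) :
    ∀ (rem j : Nat), m ∉ cur.drop j → (findManInnerGo m cur first j rem).1 = cur := by
  intro rem
  induction rem with
  | zero => intro j _; rfl
  | succ rem ih =>
    intro j hm
    rw [findManInnerGo]
    by_cases hj : j < cur.length
    · rw [dif_pos hj]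
      have hget : cur[j] ∈ cur.drop j := by
        rw [List.drop_eq_getElem_cons hj]; exact List.mem_cons_self
      have hc : ¬ cur[j] = m := fun h => hm (h ▸ hget)
      rw [if_neg hc]
      have hm' : m ∉ cur.drop (j + 1) := by
        intro h
        exact hm (by rw [List.drop_eq_getElem_cons hj]; exact List.mem_cons_of_mem _ h)
      exact ih (j + 1) hm'
    · rw [dif_neg hj]

lemma inner_of_mem (m : Int) (cur : List Int) (first : Int) (j : Nat)
    (hm : m ∈ cur.drop j) : (findManInner m cur first j).1 = cur.erase m := by
  have hj : j < cur.length := by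
    by_contra h
    rw [List.drop_eq_nil_of_le (le_of_not_gt h)] at hm
    exact absurd hm (List.not_mem_nil)
  exact innerGo_of_mem m cur first _ j hm (by omega)

lemma inner_of_not_mem (m : Int) (cur : List Int) (first : Int) (j : Nat)
    (hm : m ∉ cur.drop j) : (findManInner m cur first j).1 = cur :=
  innerGo_of_not_mem m cur first _ j hm

-- ---- eraseN facts ----
lemma eraseN_sublist (m : Int) (i : Nat) (l : List Int) : (eraseN m i l).Sublist l := by
  induction i with
  | zero => exact List.Sublist.refl l
  | succ i ih => exact (List.erase_sublist).trans ih

lemma count_eraseN (m : Int) (i : Nat) (l : List Int) (h : i ≤ l.count m) :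
    (eraseN m i l).count m = l.count m - i := by
  induction i with
  | zero => rfl
  | succ i ih =>
    have h1 : i ≤ l.count m := by omega
    rw [eraseN, List.count_erase_self, ih h1]
    omega

lemma mem_eraseN (m : Int) (i : Nat) (l : List Int) (h : i < l.count m) :
    m ∈ eraseN m i l := by
  have := count_eraseN m i l (by omega)
  exact List.count_pos_iff.mp (by omega)

lemma length_eraseN (m : Int) (i : Nat) (l : List Int) (h : i ≤ l.count m) :
    (eraseN m i l).length = l.length - i := by
  induction i with
  | zero => rfl
  | succ i ih =>
    have h1 : i ≤ l.count m := by omega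
    have hm : m ∈ eraseN m i l := mem_eraseN m i l (by omega)
    rw [eraseN, List.length_erase_of_mem hm, ih h1]
    have hcl : l.count m ≤ l.length := List.count_le_length
    omega

lemma eraseN_append (m : Int) (a b : List Int) (_hb : m ∉ b) :
    ∀ i, i ≤ a.count m → eraseN m i (a ++ m :: b) = eraseN m i a ++ m :: b := by
  intro i
  induction i with
  | zero => intro _; rfl
  | succ i ih =>
    intro h
    have h1 : i ≤ a.count m := by omega
    have hma : m ∈ eraseN m i a := mem_eraseN m i a (by omega)
    rw [eraseN, ih h1, List.erase_append_left _ hma]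
    rfl

lemma eraseN_swap (m : Int) : ∀ (i : Nat) (l : List Int),
    eraseN m (i + 1) l = eraseN m i (l.erase m) := by
  intro i
  induction i with
  | zero => intro l; rfl
  | succ i ih => intro l; rw [eraseN, ih l]; rfl

lemma filter_erase_self (m : Int) : ∀ l : List Int,
    (l.erase m).filter (fun x => x ≠ m) = l.filter (fun x => x ≠ m) := by
  intro l
  induction l with
  | nil => rfl
  | cons x t ih =>
    by_cases hx : x = m
    · subst hx
      rw [List.erase_cons_head]
      simp
    · rw [List.erase_cons_tail (by simp [hx])]
      simp only [List.filter_cons, ih]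

lemma eraseN_filter (m : Int) : ∀ (i : Nat) (l : List Int), l.count m ≤ i →
    eraseN m i l = l.filter (fun x => x ≠ m) := by
  intro i
  induction i with
  | zero =>
    intro l h
    have hall : ∀ x ∈ l, x ≠ m := by
      intro x hx hxm
      subst hxm
      have := List.count_pos_iff.mpr hx
      omega
    exact (List.filter_eq_self.mpr (by intro x hx; simpa using hall x hx)).symm
  | succ i ih =>
    intro l h
    by_cases hm : m ∈ l
    · have hc : 0 < l.count m := List.count_pos_iff.mpr hm
      rw [eraseN_swap, ih (l.erase m) (by rw [List.count_erase_self]; omega),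
          filter_erase_self]
    · rw [eraseN_swap, List.erase_of_not_mem hm,
          ih l (by rw [List.count_eq_zero.mpr hm]; omega)]

-- ---- last-occurrence decomposition ----
lemma exists_last_split (m : Int) (l : List Int) (h : m ∈ l) :
    ∃ a b : List Int, l = a ++ m :: b ∧ m ∉ b := by
  have hrev : m ∈ l.reverse := List.mem_reverse.mpr h
  obtain ⟨k, hk⟩ := Option.isSome_iff_exists.mp ((PySem.List.index?_isSome_iff _ _).mpr hrev)
  obtain ⟨pre, suf, hsplit, _, hpre⟩ := (PySem.List.index?_eq_some_iff _ _ _).mp hk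
  refine ⟨suf.reverse, pre.reverse, ?_, fun hc => hpre (List.mem_reverse.mp hc)⟩
  have h2 := congrArg List.reverse hsplit
  rw [List.reverse_reverse] at h2
  rw [h2]
  simp

-- ---- outer loop ----
lemma foldl_no_change (m : Int) : ∀ (l : List Nat) (cur : List Int) (first : Int),
    (∀ t ∈ l, m ∉ cur.drop t) →
    (l.foldl (fun (st : List Int × Int) i => findManInner m st.1 st.2 i) (cur, first)).1 = cur := by
  intro l
  induction l with
  | nil => intro cur first _; rfl
  | cons t l ih =>
    intro cur first h
    rw [List.foldl_cons]
    have h1 : (findManInner m cur first t).1 = cur :=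
      inner_of_not_mem m cur first t (h t List.mem_cons_self)
    have hp : findManInner m cur first t = (cur, (findManInner m cur first t).2) :=
      Prod.ext h1 rfl
    rw [hp]
    exact ih cur _ (fun s hs => h s (List.mem_cons_of_mem _ hs))

lemma foldl_erase_seg (m : Int) (nums : List Int) :
    ∀ (cnt j : Nat) (first : Int),
    (∀ t, j ≤ t → t < j + cnt → m ∈ (eraseN m t nums).drop t) →
    ((List.range' j cnt).foldl (fun (st : List Int × Int) i => findManInner m st.1 st.2 i)
        (eraseN m j nums, first)).1 = eraseN m (j + cnt) nums := by
  intro cnt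
  induction cnt with
  | zero => intro j first _; rfl
  | succ cnt ih =>
    intro j first h
    rw [List.range'_succ, List.foldl_cons]
    have hmem := h j le_rfl (by omega)
    have h1 : (findManInner m (eraseN m j nums) first j).1 = (eraseN m j nums).erase m :=
      inner_of_mem m _ first j hmem
    have hp : findManInner m (eraseN m j nums) first j
        = (eraseN m (j + 1) nums, (findManInner m (eraseN m j nums) first j).2) :=
      Prod.ext (by rw [h1]; rfl) rfl
    rw [hp]
    have hrec := ih (j + 1) (findManInner m (eraseN m j nums) first j).2 (fun t ht1 ht2 => h t (by omega) (by omega))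
    have heq : j + 1 + cnt = j + (cnt + 1) := by omega
    rw [heq] at hrec
    exact hrec

lemma loop_result (m : Int) (nums : List Int) (r : Nat) (first : Int)
    (hrn : r ≤ nums.length)
    (hstep : ∀ t, t < r → m ∈ (eraseN m t nums).drop t)
    (hstop : ∀ t, r ≤ t → m ∉ (eraseN m r nums).drop t) :
    ((List.range nums.length).foldl
        (fun (st : List Int × Int) i => findManInner m st.1 st.2 i) (nums, first)).1
      = eraseN m r nums := by
  rw [List.range_eq_range']
  have hsplit : List.range' 0 nums.length = List.range' 0 r ++ List.range' r (nums.length - r) := by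
    have h2 := List.range'_append (s := 0) (m := r) (n := nums.length - r) (step := 1)
    simp only [Nat.zero_add, Nat.one_mul] at h2
    have h3 : r + (nums.length - r) = nums.length := by omega
    rw [h3] at h2
    exact h2.symm
  rw [hsplit, List.foldl_append]
  have hseg := foldl_erase_seg m nums r 0 first (fun t ht1 ht2 => hstep t (by omega))
  simp only [Nat.zero_add] at hseg
  have hzero : nums = eraseN m 0 nums := rfl
  set p := (List.range' 0 r).foldl
      (fun (st : List Int × Int) i => findManInner m st.1 st.2 i) (nums, first) with hpdef
  have hp1 : p.1 = eraseN m r nums := by rw [hpdef, hzero] at *; exact hseg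
  have hp : p = (eraseN m r nums, p.2) := Prod.ext hp1 rfl
  rw [hp]
  refine foldl_no_change m _ _ _ ?_
  intro t ht
  have : r ≤ t := by
    have := List.mem_range'_1.mp ht
    omega
  exact hstop t this

-- ---- B-side fold characterisation ----
lemma foldB_some (m : Int) : ∀ (l : List Int) (v : Int),
    l.foldl (fun s x => findManAltStep m s x) (some v)
    = some ((l.filter (fun x => x ≠ m)).foldl max v) := by
  intro l
  induction l with
  | nil => intro v; rfl
  | cons x t ih =>
    intro v
    rw [List.foldl_cons]
    by_cases hx : x = m
    · have h1 : findManAltStep m (some v) x = some v := by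
        simp [findManAltStep, hx]
      have h2 : (x :: t).filter (fun x => x ≠ m) = t.filter (fun x => x ≠ m) := by
        simp [hx]
      rw [h1, h2, ih v]
    · have h2 : (x :: t).filter (fun x => x ≠ m) = x :: t.filter (fun x => x ≠ m) := by
        simp [hx]
      by_cases hlt : v < x
      · have h1 : findManAltStep m (some v) x = some x := by
          simp [findManAltStep, hx, hlt]
        rw [h1, h2, List.foldl_cons, max_eq_right hlt.le, ih x]
      · have h1 : findManAltStep m (some v) x = some v := by
          simp [findManAltStep, hx, hlt]
        rw [h1, h2, List.foldl_cons, max_eq_left (le_of_not_gt hlt), ih v]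

lemma foldB_none (m : Int) : ∀ (l : List Int),
    l.foldl (fun s x => findManAltStep m s x) none
    = PySem.List.max? (l.filter (fun x => x ≠ m)) (fun x => x) := by
  intro l
  induction l with
  | nil => rfl
  | cons x t ih =>
    rw [List.foldl_cons]
    by_cases hx : x = m
    · have h1 : findManAltStep m none x = none := by simp [findManAltStep, hx]
      have h2 : (x :: t).filter (fun x => x ≠ m) = t.filter (fun x => x ≠ m) := by
        simp [hx]
      rw [h1, h2, ih]
    · have h1 : findManAltStep m none x = some x := by simp [findManAltStep, hx]
      have h2 : (x :: t).filter (fun x => x ≠ m) = x :: t.filter (fun x => x ≠ m) := by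
        simp [hx]
      rw [h1, h2, foldB_some m t x, PySem.List.max?_id_cons]

-- ---- facts from the precondition ----
lemma pre_facts (nums : List Int) (hpre : Pre_findMan nums) :
    PySem.List.max? nums (fun x => x) = some (pyMaxD nums) ∧
    (∀ x ∈ nums, x ≤ pyMaxD nums) ∧ pyMaxD nums ∈ nums ∧
    ∃ y ∈ nums, y ≠ pyMaxD nums := by
  obtain ⟨x, hx, y, hy, hxy⟩ := hpre
  have hne : nums ≠ [] := by rintro rfl; exact absurd hx (List.not_mem_nil)
  obtain ⟨M, hM⟩ := Option.isSome_iff_exists.mp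
    (by rw [Option.isSome_iff_ne_none]
        intro h
        exact hne ((PySem.List.max?_eq_none_iff nums (fun x : Int => x)).mp h))
  have hMd : pyMaxD nums = M := by rw [pyMaxD, hM]; rfl
  have hmax : ∀ z ∈ nums, z ≤ M := PySem.List.max?_isMax hM
  refine ⟨by rw [hMd]; exact hM, by rw [hMd]; exact hmax, by rw [hMd]; exact PySem.List.max?_mem hM, ?_⟩
  by_cases hxm : x = pyMaxD nums
  · refine ⟨y, hy, fun h => hxy ?_⟩
    rw [hxm, h]
  · exact ⟨x, hx, hxm⟩

-- evaluate B under Pre_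
lemma B_eval (nums : List Int) (hpre : Pre_findMan nums) :
    ∃ v, PySem.List.max? (nums.filter (fun x => x ≠ pyMaxD nums)) (fun x => x) = some v ∧
      findMan_alt nums = ((PySem.List.index? nums v).getD 0 : Nat) + 1 := by
  obtain ⟨hsome, hmax, hmem, y, hy, hyne⟩ := pre_facts nums hpre
  have hyf : y ∈ nums.filter (fun x => x ≠ pyMaxD nums) :=
    List.mem_filter.mpr ⟨hy, by simpa using hyne⟩
  have hfne : nums.filter (fun x => x ≠ pyMaxD nums) ≠ [] := by
    rintro h; rw [h] at hyf; exact absurd hyf (List.not_mem_nil)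
  obtain ⟨v, hv⟩ := Option.isSome_iff_exists.mp
    (by rw [Option.isSome_iff_ne_none]
        intro h
        exact hfne ((PySem.List.max?_eq_none_iff _ (fun x : Int => x)).mp h))
  refine ⟨v, hv, ?_⟩
  show (let m := (PySem.List.max? nums (fun x => x)).getD 0; _ : Int) = _
  simp only [findMan_alt]
  have hm0 : (PySem.List.max? nums (fun x => x)).getD 0 = pyMaxD nums := rfl
  rw [hm0, foldB_none (pyMaxD nums) nums, hv]

-- evaluate A: the outer loop leaves eraseN (pyMaxD nums) r nums
lemma A_eval (nums : List Int) (r : Nat)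
    (hrn : r ≤ nums.length)
    (hstep : ∀ t, t < r → pyMaxD nums ∈ (eraseN (pyMaxD nums) t nums).drop t)
    (hstop : ∀ t, r ≤ t → pyMaxD nums ∉ (eraseN (pyMaxD nums) r nums).drop t) :
    findMan nums
      = ((PySem.List.index? nums (pyMaxD (eraseN (pyMaxD nums) r nums))).getD 0 : Nat) + 1 := by
  simp only [findMan]
  rw [loop_result (pyMaxD nums) nums r 0 hrn hstep hstop]

-- decomposition bookkeeping: counts and the drop condition
lemma count_split (m : Int) (a b : List Int) (hb : m ∉ b) :
    (a ++ m :: b).count m = a.count m + 1 := by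
  rw [List.count_append, List.count_cons_self, List.count_eq_zero.mpr hb]

lemma step_mem (m : Int) (a b : List Int) (hb : m ∉ b) (t : Nat)
    (htc : t ≤ a.count m) (hta : 2 * t ≤ a.length) :
    m ∈ (eraseN m t (a ++ m :: b)).drop t := by
  rw [eraseN_append m a b hb t htc]
  have hlen : (eraseN m t a).length = a.length - t := length_eraseN m t a htc
  have hle : t ≤ (eraseN m t a).length := by omega
  rw [List.drop_append_of_le_length hle]
  exact List.mem_append_right _ List.mem_cons_self

lemma not_mem_drop_big (m : Int) (x b : List Int) (hb : m ∉ b) (t : Nat)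
    (ht : x.length < t) : m ∉ (x ++ m :: b).drop t := by
  intro hmem
  rw [List.drop_append] at hmem
  rcases List.mem_append.mp hmem with h | h
  · have hnil : x.drop t = [] := List.drop_eq_nil_of_le (le_of_lt ht)
    rw [hnil] at h
    exact absurd h (List.not_mem_nil)
  · have h1 : t - x.length = (t - x.length - 1) + 1 := by omega
    rw [h1, List.drop_succ_cons] at h
    exact hb (List.mem_of_mem_drop h)

-- A = B outside D_ (under Pre_)
lemma unchanged_main (nums : List Int) (hpre : Pre_findMan nums) (hnd : ¬ D_findMan nums) :
    findMan nums = findMan_alt nums := by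
  obtain ⟨hsome, hmax, hmem, y, hy, hyne⟩ := pre_facts nums hpre
  set M := pyMaxD nums with hMdef
  obtain ⟨a, b, hsplit, hb⟩ := exists_last_split M nums hmem
  have hcnt : nums.count M = a.count M + 1 := by rw [hsplit]; exact count_split M a b hb
  set c := a.count M with hcdef
  -- ¬D gives the no-stall inequality 2*c ≤ a.length
  have halen : 2 * c ≤ a.length := by
    rcases Nat.eq_zero_or_pos c with hc0 | hcpos
    · omega
    · have h2 : 2 ≤ nums.count M := by omega
      have hD' : M ∈ nums.drop (2 * (nums.count M - 1)) := by
        by_contra hno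
        exact hnd ⟨M, hmem, hmax, h2, hno⟩
      by_contra hlt
      have h2c : 2 * (nums.count M - 1) = 2 * c := by omega
      rw [h2c, hsplit] at hD'
      exact absurd hD' (not_mem_drop_big M a b hb (2 * c) (by omega))
  -- run the loop to completion: r = c + 1 erasures
  have hstep : ∀ t, t < c + 1 → M ∈ (eraseN M t nums).drop t := by
    intro t ht
    rw [hsplit]
    exact step_mem M a b hb t (by omega) (by omega)
  have hstop : ∀ t, c + 1 ≤ t → M ∉ (eraseN M (c + 1) nums).drop t := by
    intro t _ hmem'
    have h0 : (eraseN M (c + 1) nums).count M = 0 := by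
      rw [count_eraseN M (c + 1) nums (by omega)]; omega
    exact absurd (List.mem_of_mem_drop hmem') (List.count_eq_zero.mp h0)
  have hrn : c + 1 ≤ nums.length := by
    have := List.count_le_length (a := M) (l := nums)
    omega
  have hA := A_eval nums (c + 1) hrn hstep hstop
  have hfilter : eraseN M (c + 1) nums = nums.filter (fun x => x ≠ M) :=
    eraseN_filter M (c + 1) nums (by omega)
  obtain ⟨v, hv, hB⟩ := B_eval nums hpre
  rw [hA, hB, hfilter]
  have : pyMaxD (nums.filter (fun x => x ≠ M)) = v := by
    rw [pyMaxD, hv]; rfl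
  rw [this]

-- A ≠ B inside D_ (under Pre_)
lemma mem_drop_small (m : Int) (a b : List Int) (t : Nat) (ht : t ≤ a.length) :
    m ∈ (a ++ m :: b).drop t := by
  rw [List.drop_append_of_le_length ht]
  exact List.mem_append_right _ List.mem_cons_self

lemma tight_main (nums : List Int) (hpre : Pre_findMan nums) (hd : D_findMan nums) :
    findMan nums ≠ findMan_alt nums := by
  obtain ⟨hsome, hmax, hmem, y, hy, hyne⟩ := pre_facts nums hpre
  set M := pyMaxD nums with hMdef
  obtain ⟨a, b, hsplit, hb⟩ := exists_last_split M nums hmem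
  have hcnt : nums.count M = a.count M + 1 := by rw [hsplit]; exact count_split M a b hb
  set c := a.count M with hcdef
  have hd2 : 2 ≤ nums.count M ∧ M ∉ nums.drop (2 * (nums.count M - 1)) := by
    obtain ⟨m', hm'mem, hm'max, h2, hno⟩ := hd
    have hm'eq : m' = M := le_antisymm (hmax m' hm'mem) (hm'max M hmem)
    rw [hm'eq] at h2 hno
    exact ⟨h2, hno⟩
  have hcpos : 1 ≤ c := by omega
  -- D_ gives the stall inequality a.length < 2*c
  have halen : a.length < 2 * c := by
    by_contra hge
    refine hd2.2 ?_
    have h2c : 2 * (nums.count M - 1) = 2 * c := by omega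
    rw [h2c, hsplit]
    exact mem_drop_small M a b (2 * c) (by omega)
  -- the loop erases only r = a.length/2 + 1 of the c + 1 maxima, then stalls
  set r := a.length / 2 + 1 with hrdef
  have hrc : r ≤ c := by omega
  have hstep : ∀ t, t < r → M ∈ (eraseN M t nums).drop t := by
    intro t ht
    rw [hsplit]
    exact step_mem M a b hb t (by omega) (by omega)
  have hstop : ∀ t, r ≤ t → M ∉ (eraseN M r nums).drop t := by
    intro t ht
    rw [hsplit, eraseN_append M a b hb r (by omega)]
    refine not_mem_drop_big M _ b hb t ?_
    rw [length_eraseN M r a (by omega)]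
    omega
  have hrn : r ≤ nums.length := by
    have := List.count_le_length (a := M) (l := nums)
    omega
  have hA := A_eval nums r hrn hstep hstop
  -- the final list still contains M, so its maximum is M
  have hcur : eraseN M r nums = eraseN M r a ++ M :: b := by
    rw [hsplit]; exact eraseN_append M a b hb r (by omega)
  have hMcur : M ∈ eraseN M r nums := by
    rw [hcur]; exact List.mem_append_right _ List.mem_cons_self
  have hsub : (eraseN M r nums).Sublist nums := eraseN_sublist M r nums
  obtain ⟨M', hM'⟩ := Option.isSome_iff_exists.mp
    (show (PySem.List.max? (eraseN M r nums) (fun x => x)).isSome by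
      rw [Option.isSome_iff_ne_none]
      intro h
      rw [(PySem.List.max?_eq_none_iff _ (fun x : Int => x)).mp h] at hMcur
      exact absurd hMcur (List.not_mem_nil))
  have hM'eq : M' = M :=
    le_antisymm (hmax M' (hsub.subset (PySem.List.max?_mem hM')))
      (PySem.List.max?_isMax hM' M hMcur)
  have hmaxcur : pyMaxD (eraseN M r nums) = M := by rw [pyMaxD, hM', hM'eq]; rfl
  obtain ⟨v, hv, hB⟩ := B_eval nums hpre
  rw [hA, hB, hmaxcur]
  -- A reports the first index of M, B the first index of v ≠ M: these differ
  have hvf := PySem.List.max?_mem hv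
  have hvne : v ≠ M := by
    have := (List.mem_filter.mp hvf).2
    simpa using this
  have hvnums : v ∈ nums := (List.mem_filter.mp hvf).1
  obtain ⟨p, hp⟩ := Option.isSome_iff_exists.mp ((PySem.List.index?_isSome_iff _ _).mpr hmem)
  obtain ⟨q, hq⟩ := Option.isSome_iff_exists.mp ((PySem.List.index?_isSome_iff _ _).mpr hvnums)
  obtain ⟨hpl, hpv, -⟩ := PySem.List.getElem_of_index?_eq_some hp
  obtain ⟨hql, hqv, -⟩ := PySem.List.getElem_of_index?_eq_some hq
  have hpq : p ≠ q := by
    rintro rfl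
    exact hvne (by rw [← hqv, hpv])
  rw [hp, hq]
  simp only [Option.getD_some]
  intro hcontra
  have : (p : Int) = (q : Int) := by omega
  exact hpq (by exact_mod_cast this)

-- ===== VERDICT (by name: the statement is the Claim_ definition above) =====
theorem findMan_spec : Claim_unchanged_findMan := by
  intro nums _ hpre hnd
  exact unchanged_main nums hpre hnd

theorem findMan_changed : Claim_changed_findMan := by
  unfold Claim_changed_findMan; decide

theorem findMan_tight : Claim_exact_findMan := by
  intro nums _ hpre hd
  exact tight_main nums hpre hd
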